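-- pv_equiv track=rewrite | github.com/Harito97/PythonAndScratch3Tutorial | ThiTinHocTre/Archived/2024_04_11/char.py | find_largest_subgrid
-- ===== SOURCE A (Python) =====
-- def find_largest_subgrid(matrix, k):
--     m = len(matrix)
--     n = len(matrix[0])
--
--     max_subgrid_size = 0
--
--     # Tính prefix sums để có thể tính số lượng kí tự 'A' và 'B' trong một phạm vi nhanh chóng
--     prefix_sums = [[0] * (n + 1) for _ in range(m + 1)]
--     for i in range(1, m + 1):
--         for j in range(1, n + 1):
--             prefix_sums[i][j] = prefix_sums[i - 1][j] + prefix_sums[i][j - 1] - prefix_sums[i - 1][j - 1] + (matrix[i - 1][j - 1] == 'A')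
--
--     # Kiểm tra tất cả các hình chữ nhật con có thể
--     for i in range(1, m + 1):
--         for j in range(1, n + 1):
--             for p in range(i, m + 1):
--                 for q in range(j, n + 1):
--                     num_A = prefix_sums[p][q] - prefix_sums[p][j - 1] - prefix_sums[i - 1][q] + prefix_sums[i - 1][j - 1]
--                     num_B = (p - i + 1) * (q - j + 1) - num_A
--                     if abs(num_A - num_B) <= k:
--                         max_subgrid_size = max(max_subgrid_size, (p - i + 1) * (q - j + 1))
--
--     return max_subgrid_size
-- ===== SOURCE B (Python) =====
-- def find_largest_subgrid(matrix, k):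
--     m = len(matrix)
--     n = len(matrix[0])
--     best = 0
--     for i in range(m):
--         col = [0] * n
--         for p in range(i, m):
--             row = matrix[p]
--             col = [col[c] + (row[c] == 'A') for c in range(n)]
--             h = p - i + 1
--             for j in range(n):
--                 a = 0
--                 for q in range(j, n):
--                     a += col[q]
--                     w = q - j + 1
--                     if abs(2 * a - h * w) <= k:
--                         best = max(best, h * w)
--     return best
-- ===== Notes on version B (the rewrite author's own statement) =====
-- stated objective: alternative
-- what changed: B drops A's precomputed 2D prefix-sum table and 4-nested corner enumeration; it enumerates row pairs while incrementally maintaining a per-column 'A'-count array and scans column ranges with a running sum.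
import Mathlib
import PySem

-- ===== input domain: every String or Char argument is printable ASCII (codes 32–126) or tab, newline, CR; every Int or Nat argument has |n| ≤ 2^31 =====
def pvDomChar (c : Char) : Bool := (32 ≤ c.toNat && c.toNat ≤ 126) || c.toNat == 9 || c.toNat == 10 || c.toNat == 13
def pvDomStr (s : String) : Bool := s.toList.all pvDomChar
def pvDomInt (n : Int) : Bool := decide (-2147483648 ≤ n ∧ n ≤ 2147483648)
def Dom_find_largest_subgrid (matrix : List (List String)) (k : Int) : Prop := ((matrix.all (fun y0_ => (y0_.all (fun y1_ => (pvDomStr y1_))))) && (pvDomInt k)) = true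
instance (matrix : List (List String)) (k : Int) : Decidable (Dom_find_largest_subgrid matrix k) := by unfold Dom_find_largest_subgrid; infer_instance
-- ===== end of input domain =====

-- B replaces A's 2D prefix-sum table and 4-nested corner enumeration by row-pair
-- enumeration with an incrementally maintained per-column count array and a
-- running-sum 1D scan over column ranges (objective: alternative).

-- ===== PORT A =====
-- A-side helpers: 2D list read/write (indices are nonnegative and in range wherever used)
def pvGrid2Get (g : List (List Int)) (i j : Int) : Int :=
  PySem.List.pyGetD (PySem.List.pyGetD g i []) j 0

def pvGrid2Set (g : List (List Int)) (i j : Int) (v : Int) : List (List Int) :=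
  PySem.List.pySetD g i (PySem.List.pySetD (PySem.List.pyGetD g i []) j v)

-- '[[0]*(n+1) for _ in range(m+1)]'
def pvInit (m n : Int) : List (List Int) :=
  (PySem.List.pyRange 0 (m + 1) 1).map (fun _ => PySem.List.pyRepeat [0] (n + 1))

-- inner 'for j in range(1, n+1)' of A's prefix-sum build, for one row i
def pvRowStep (matrix : List (List String)) (n : Int) (g : List (List Int)) (i : Int) :
    List (List Int) :=
  (PySem.List.pyRange 1 (n + 1) 1).foldl (fun g j =>
    pvGrid2Set g i j
      (pvGrid2Get g (i - 1) j + pvGrid2Get g i (j - 1) - pvGrid2Get g (i - 1) (j - 1) +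
        (if PySem.List.pyGetD (PySem.List.pyGetD matrix (i - 1) []) (j - 1) "" = "A" then 1 else 0))) g

-- A's prefix-sum table
def pvBuild (matrix : List (List String)) (m n : Int) : List (List Int) :=
  (PySem.List.pyRange 1 (m + 1) 1).foldl (pvRowStep matrix n) (pvInit m n)

def find_largest_subgrid (matrix : List (List String)) (k : Int) : Int :=
  let m : Int := matrix.length
  let n : Int := (PySem.List.pyGetD matrix 0 []).length
  let prefix_sums := pvBuild matrix m n
  (PySem.List.pyRange 1 (m + 1) 1).foldl (fun best i =>
    (PySem.List.pyRange 1 (n + 1) 1).foldl (fun best j =>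
      (PySem.List.pyRange i (m + 1) 1).foldl (fun best p =>
        (PySem.List.pyRange j (n + 1) 1).foldl (fun best q =>
          let num_A := pvGrid2Get prefix_sums p q - pvGrid2Get prefix_sums p (j - 1) -
            pvGrid2Get prefix_sums (i - 1) q + pvGrid2Get prefix_sums (i - 1) (j - 1)
          let num_B := (p - i + 1) * (q - j + 1) - num_A
          if |num_A - num_B| ≤ k then max best ((p - i + 1) * (q - j + 1)) else best)
          best) best) best) 0

-- ===== PORT B =====
def find_largest_subgrid_alt (matrix : List (List String)) (k : Int) : Int :=
  let m : Int := matrix.length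
  let n : Int := (PySem.List.pyGetD matrix 0 []).length
  (PySem.List.pyRange 0 m 1).foldl (fun best i =>
    ((PySem.List.pyRange i m 1).foldl (fun (st : List Int × Int) p =>
      let row := PySem.List.pyGetD matrix p []
      let col := (PySem.List.pyRange 0 n 1).map (fun c =>
        PySem.List.pyGetD st.1 c 0 + (if PySem.List.pyGetD row c "" = "A" then 1 else 0))
      let h := p - i + 1
      let best := (PySem.List.pyRange 0 n 1).foldl (fun best j =>
        ((PySem.List.pyRange j n 1).foldl (fun (ab : Int × Int) q =>
          let a := ab.1 + PySem.List.pyGetD col q 0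
          let w := q - j + 1
          (a, if |2 * a - h * w| ≤ k then max ab.2 (h * w) else ab.2)) (0, best)).2) st.2
      (col, best)) (PySem.List.pyRepeat [0] n, best)).2) 0

-- ===== PRECONDITION & SPEC =====
-- Pre_ excludes exactly the inputs where A raises IndexError: the empty matrix
-- (matrix[0]) and matrices with a row shorter than the first row.
def Pre_find_largest_subgrid (matrix : List (List String)) (k : Int) : Prop :=
  matrix ≠ [] ∧ ∀ row ∈ matrix, (matrix.headI).length ≤ row.length
instance (matrix : List (List String)) (k : Int) : Decidable (Pre_find_largest_subgrid matrix k) := by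
  unfold Pre_find_largest_subgrid; infer_instance

def pvWitness_find_largest_subgrid : List (List String) × Int := ([["A", "B"], ["B", "A"]], 1)

def Spec_find_largest_subgrid (matrix : List (List String)) (k : Int) (out : Int) : Prop := out = find_largest_subgrid_alt matrix k
instance (matrix : List (List String)) (k : Int) (out : Int) : Decidable (Spec_find_largest_subgrid matrix k out) := by unfold Spec_find_largest_subgrid; infer_instance

-- ===== CLAIM (what is proved, stated in full; the proofs are below) =====
def Claim_equal_find_largest_subgrid : Prop := ∀ (matrix : List (List String)) (k : Int), Dom_find_largest_subgrid matrix k → Pre_find_largest_subgrid matrix k → Spec_find_largest_subgrid matrix k (find_largest_subgrid matrix k)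

-- ===== LEMMAS AND PROOFS =====

-- generic running-max fold facts
theorem pvFoldlIfMax {α : Type} (L : List α) (P : α → Prop) [DecidablePred P] (f : α → Int)
    (b : Int) :
    L.foldl (fun b x => if P x then max b (f x) else b) b =
      List.foldl max b ((L.filter (fun x => decide (P x))).map f) := by
  induction L generalizing b with
  | nil => rfl
  | cons x t ih =>
    simp only [List.foldl_cons, List.filter_cons]
    by_cases h : P x <;> simp [h, ih]

theorem pvFoldlMaxFlat {α : Type} (L : List α) (g : α → List Int) (b : Int) :
    L.foldl (fun b x => List.foldl max b (g x)) b = List.foldl max b (L.flatMap g) := by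
  induction L generalizing b with
  | nil => rfl
  | cons x t ih => simp [List.foldl_append, ih]

theorem pvLeFoldlMax (l : List Int) (b : Int) : b ≤ l.foldl max b := by
  induction l generalizing b with
  | nil => exact le_refl _
  | cons x t ih => exact le_trans (le_max_left b x) (ih _)

theorem pvMemLeFoldlMax (l : List Int) (b x : Int) (hx : x ∈ l) : x ≤ l.foldl max b := by
  induction l generalizing b with
  | nil => cases hx
  | cons y t ih =>
    rcases List.mem_cons.mp hx with h | h
    · subst h; exact le_trans (le_max_right b x) (pvLeFoldlMax _ _)
    · exact ih _ h

theorem pvFoldlMaxLe (l : List Int) (b c : Int) (hb : b ≤ c) (h : ∀ x ∈ l, x ≤ c) :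
    l.foldl max b ≤ c := by
  induction l generalizing b with
  | nil => exact hb
  | cons x t ih =>
    exact ih _ (max_le hb (h x (List.mem_cons_self))) (fun y hy => h y (List.mem_cons_of_mem _ hy))

theorem pvFoldlMaxCongr (l l' : List Int) (b : Int) (h : ∀ x, x ∈ l ↔ x ∈ l') :
    l.foldl max b = l'.foldl max b := by
  apply le_antisymm
  · exact pvFoldlMaxLe _ _ _ (pvLeFoldlMax _ _)
      (fun x hx => pvMemLeFoldlMax _ _ _ ((h x).mp hx))
  · exact pvFoldlMaxLe _ _ _ (pvLeFoldlMax _ _)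
      (fun x hx => pvMemLeFoldlMax _ _ _ ((h x).mpr hx))

-- counting 'A' cells
def pvCell (matrix : List (List String)) (r c : Int) : Int :=
  if PySem.List.pyGetD (PySem.List.pyGetD matrix r []) c "" = "A" then 1 else 0

def pvRowS (matrix : List (List String)) (r c d : Int) : Int :=
  ((PySem.List.pyRange c d 1).map (pvCell matrix r)).sum

def pvRC (matrix : List (List String)) (a b c d : Int) : Int :=
  ((PySem.List.pyRange a b 1).map (fun r => pvRowS matrix r c d)).sum

def pvCnt (matrix : List (List String)) (i j : Int) : Int := pvRC matrix 0 i 0 j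

-- the value x is the area of some subrectangle satisfying the |#A - #B| ≤ k condition
def pvGood (matrix : List (List String)) (k x : Int) : Prop :=
  ∃ a b c d : Int, 0 ≤ a ∧ a < b ∧ b ≤ (matrix.length : Int) ∧ 0 ≤ c ∧ c < d ∧
    d ≤ ((PySem.List.pyGetD matrix 0 []).length : Int) ∧
    |2 * pvRC matrix a b c d - (b - a) * (d - c)| ≤ k ∧ x = (b - a) * (d - c)

theorem pvSumSplit (f : Int → Int) (a e b : Int) (h1 : a ≤ e) (h2 : e ≤ b) :
    ((PySem.List.pyRange a b 1).map f).sum =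
      ((PySem.List.pyRange a e 1).map f).sum + ((PySem.List.pyRange e b 1).map f).sum := by
  rw [PySem.List.pyRange_one_append a e b h1 h2, List.map_append, List.sum_append]

theorem pvRC_split_rows (matrix : List (List String)) (a e b c d : Int) (h1 : a ≤ e) (h2 : e ≤ b) :
    pvRC matrix a b c d = pvRC matrix a e c d + pvRC matrix e b c d :=
  pvSumSplit _ a e b h1 h2

theorem pvRC_split_cols (matrix : List (List String)) (a b c e d : Int) (h1 : c ≤ e) (h2 : e ≤ d) :
    pvRC matrix a b c d = pvRC matrix a b c e + pvRC matrix a b e d := by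
  unfold pvRC
  have : ∀ r : Int, pvRowS matrix r c d = pvRowS matrix r c e + pvRowS matrix r e d :=
    fun r => pvSumSplit _ c e d h1 h2
  calc ((PySem.List.pyRange a b 1).map (fun r => pvRowS matrix r c d)).sum
      = ((PySem.List.pyRange a b 1).map (fun r => pvRowS matrix r c e + pvRowS matrix r e d)).sum := by
        exact congrArg List.sum (List.map_congr_left (fun r _ => this r))
    _ = _ := by
        rw [PySem.List.sum_map_add_int]

theorem pvRC_empty_rows (matrix : List (List String)) (a b c d : Int) (h : b ≤ a) :
    pvRC matrix a b c d = 0 := by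
  unfold pvRC
  rw [PySem.List.pyRange_one_eq_nil h]
  rfl

theorem pvRC_empty_cols (matrix : List (List String)) (a b c d : Int) (h : d ≤ c) :
    pvRC matrix a b c d = 0 := by
  unfold pvRC pvRowS
  rw [PySem.List.pyRange_one_eq_nil h]
  simp

theorem pvRC_single (matrix : List (List String)) (a c : Int) :
    pvRC matrix a (a + 1) c (c + 1) = pvCell matrix a c := by
  unfold pvRC pvRowS
  rw [PySem.List.pyRange_one_singleton, PySem.List.pyRange_one_singleton]
  simp

theorem pvInclExcl (matrix : List (List String)) (a b c d : Int)
    (ha : 0 ≤ a) (hab : a ≤ b) (hc : 0 ≤ c) (hcd : c ≤ d) :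
    pvCnt matrix b d - pvCnt matrix b c - pvCnt matrix a d + pvCnt matrix a c =
      pvRC matrix a b c d := by
  unfold pvCnt
  have h1 : pvRC matrix 0 b 0 d = pvRC matrix 0 a 0 d + pvRC matrix a b 0 d :=
    pvRC_split_rows matrix 0 a b 0 d ha hab
  have h2 : pvRC matrix 0 b 0 c = pvRC matrix 0 a 0 c + pvRC matrix a b 0 c :=
    pvRC_split_rows matrix 0 a b 0 c ha hab
  have h3 : pvRC matrix a b 0 d = pvRC matrix a b 0 c + pvRC matrix a b c d :=
    pvRC_split_cols matrix a b 0 c d hc hcd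
  omega

theorem pvCntRecur (matrix : List (List String)) (t s : Int) (ht : 1 ≤ t) (hs : 1 ≤ s) :
    pvCnt matrix t s =
      pvCnt matrix (t - 1) s + pvCnt matrix t (s - 1) - pvCnt matrix (t - 1) (s - 1) +
        pvCell matrix (t - 1) (s - 1) := by
  have h := pvInclExcl matrix (t - 1) t (s - 1) s (by omega) (by omega) (by omega) (by omega)
  have h2 : pvRC matrix (t - 1) t (s - 1) s = pvCell matrix (t - 1) (s - 1) := by
    have := pvRC_single matrix (t - 1) (s - 1)
    have e1 : t - 1 + 1 = t := by omega
    have e2 : s - 1 + 1 = s := by omega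
    rw [e1, e2] at this
    exact this
  omega

-- grid shape and read/write lemmas
def pvShape (g : List (List Int)) (m n : Int) : Prop :=
  g.length = m.toNat + 1 ∧ ∀ row ∈ g, row.length = n.toNat + 1

theorem pvInit_rows (m n : Int) (row : List Int) (h : row ∈ pvInit m n) :
    row = List.replicate (n+1).toNat 0 := by
  unfold pvInit at h
  rw [List.mem_map] at h
  obtain ⟨x, _, hx⟩ := h
  rw [← hx, PySem.List.pyRepeat_singleton]

theorem pvShape_init (m n : Int) (hm : 0 ≤ m) (hn : 0 ≤ n) : pvShape (pvInit m n) m n := by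
  constructor
  · simp [pvInit, PySem.List.length_pyRange_one]; omega
  · intro row hrow
    rw [pvInit_rows m n row hrow]
    simp; omega

theorem pvZeroRow (xs : List Int) (hz : ∀ x ∈ xs, x = 0) (c : Int) :
    PySem.List.pyGetD xs c 0 = 0 := by
  by_cases h : PySem.Raise.InRange xs.length c
  · exact hz _ (PySem.List.pyGetD_mem _ _ (by simpa using h))
  · apply PySem.List.pyGetD_of_none
    rw [PySem.List.pyGet?_eq_none_iff]
    simpa using h

theorem pvGridGet_init (m n r c : Int) : pvGrid2Get (pvInit m n) r c = 0 := by
  unfold pvGrid2Get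
  apply pvZeroRow
  intro x hx
  have hrow : PySem.List.pyGetD (pvInit m n) r [] = [] ∨
      PySem.List.pyGetD (pvInit m n) r [] ∈ pvInit m n := by
    by_cases h : PySem.Raise.InRange (pvInit m n).length r
    · exact Or.inr (PySem.List.pyGetD_mem _ _ (by simpa using h))
    · left
      apply PySem.List.pyGetD_of_none
      rw [PySem.List.pyGet?_eq_none_iff]
      simpa using h
  rcases hrow with h | h
  · rw [h] at hx; cases hx
  · rw [pvInit_rows m n _ h] at hx
    exact List.eq_of_mem_replicate hx

theorem pvSet_eq (g : List (List Int)) (i j v : Int) (hi : 0 ≤ i) (hj : 0 ≤ j) :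
    pvGrid2Set g i j v = g.set i.toNat ((PySem.List.pyGetD g i []).set j.toNat v) := by
  unfold pvGrid2Set
  rw [PySem.List.pySetD_of_nonneg _ _ hj, PySem.List.pySetD_of_nonneg _ _ hi]

theorem pvShape_set (g : List (List Int)) (m n i j : Int) (hg : pvShape g m n)
    (hi : 0 ≤ i) (him : i ≤ m) (hj : 0 ≤ j) (v : Int) :
    pvShape (pvGrid2Set g i j v) m n := by
  obtain ⟨hlen, hrows⟩ := hg
  rw [pvSet_eq g i j v hi hj]
  constructor
  · simpa using hlen
  · intro row hrow
    rcases List.mem_or_eq_of_mem_set hrow with h | h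
    · exact hrows row h
    · subst h
      rw [List.length_set]
      exact hrows _ (PySem.List.pyGetD_mem _ _ (by simp [PySem.Raise.InRange, hlen]; omega))

theorem pvGet_set_self (g : List (List Int)) (m n i j : Int) (hg : pvShape g m n)
    (hi : 0 ≤ i) (him : i ≤ m) (hj : 0 ≤ j) (hjn : j ≤ n) (v : Int) :
    pvGrid2Get (pvGrid2Set g i j v) i j = v := by
  obtain ⟨hlen, hrows⟩ := hg
  have hilt : i.toNat < g.length := by omega
  have hrl : (PySem.List.pyGetD g i []).length = n.toNat + 1 := by
    rw [PySem.List.pyGetD_eq_getElem g [] hi (by omega)]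
    exact hrows _ (List.getElem_mem _)
  rw [pvSet_eq g i j v hi hj]
  unfold pvGrid2Get
  rw [PySem.List.pyGetD_eq_getElem _ [] hi (by simp; omega)]
  rw [List.getElem_set_self]
  rw [PySem.List.pyGetD_eq_getElem _ 0 hj (by simp [hrl]; omega)]
  rw [List.getElem_set_self]

theorem pvGet_set_ne (g : List (List Int)) (m n i j r c : Int) (hg : pvShape g m n)
    (hi : 0 ≤ i) (him : i ≤ m) (hj : 0 ≤ j) (hjn : j ≤ n)
    (hr : 0 ≤ r) (hrm : r ≤ m) (hc : 0 ≤ c) (hcn : c ≤ n)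
    (hne : ¬(r = i ∧ c = j)) (v : Int) :
    pvGrid2Get (pvGrid2Set g i j v) r c = pvGrid2Get g r c := by
  obtain ⟨hlen, hrows⟩ := hg
  rw [pvSet_eq g i j v hi hj]
  unfold pvGrid2Get
  by_cases hri : r = i
  · subst hri
    have hc_ne : c ≠ j := fun h => hne ⟨rfl, h⟩
    rw [PySem.List.pyGetD_eq_getElem _ [] hr (by simp; omega)]
    rw [List.getElem_set_self]
    rw [PySem.List.pyGetD_eq_getElem g [] hr (by omega)]
    have hrl : (g[r.toNat]'(by omega) : List Int).length = n.toNat + 1 :=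
      hrows _ (List.getElem_mem _)
    rw [PySem.List.pyGetD_eq_getElem _ 0 hc (by simp [hrl]; omega)]
    rw [PySem.List.pyGetD_eq_getElem _ 0 hc (by simp [hrl]; omega)]
    rw [List.getElem_set_ne]
    intro h
    exact hc_ne (by omega)
  · rw [PySem.List.pyGetD_eq_getElem _ [] hr (by simp; omega)]
    rw [PySem.List.pyGetD_eq_getElem g [] hr (by omega)]
    rw [List.getElem_set_ne]
    intro h
    exact hri (by omega)

-- build correctness
theorem pvRowStep_inv (matrix : List (List String)) (m n t : Int)
    (ht : 1 ≤ t) (htm : t ≤ m) (hn : 0 ≤ n) (g : List (List Int)) (hg : pvShape g m n)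
    (hG : ∀ r c, 0 ≤ r → r ≤ m → 0 ≤ c → c ≤ n →
      pvGrid2Get g r c = if r ≤ t - 1 then pvCnt matrix r c else 0) :
    pvShape (pvRowStep matrix n g t) m n ∧
      ∀ r c, 0 ≤ r → r ≤ m → 0 ≤ c → c ≤ n →
        pvGrid2Get (pvRowStep matrix n g t) r c = if r ≤ t then pvCnt matrix r c else 0 := by
  have key : ∀ s : Nat, (s : Int) ≤ n →
      pvShape ((PySem.List.pyRange 1 ((s : Int) + 1) 1).foldl (fun g j =>
        pvGrid2Set g t j
          (pvGrid2Get g (t - 1) j + pvGrid2Get g t (j - 1) - pvGrid2Get g (t - 1) (j - 1) +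
            (if PySem.List.pyGetD (PySem.List.pyGetD matrix (t - 1) []) (j - 1) "" = "A" then 1 else 0))) g) m n ∧
      ∀ r c, 0 ≤ r → r ≤ m → 0 ≤ c → c ≤ n →
        pvGrid2Get ((PySem.List.pyRange 1 ((s : Int) + 1) 1).foldl (fun g j =>
          pvGrid2Set g t j
            (pvGrid2Get g (t - 1) j + pvGrid2Get g t (j - 1) - pvGrid2Get g (t - 1) (j - 1) +
              (if PySem.List.pyGetD (PySem.List.pyGetD matrix (t - 1) []) (j - 1) "" = "A" then 1 else 0))) g) r c =
          if r ≤ t - 1 then pvCnt matrix r c else if r = t ∧ c ≤ (s : Int) then pvCnt matrix r c else 0 := by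
    intro s
    induction s with
    | zero =>
      intro _
      rw [PySem.List.pyRange_one_eq_nil (by norm_num)]
      refine ⟨hg, fun r c hr hrm hc hcn => ?_⟩
      rw [List.foldl_nil, hG r c hr hrm hc hcn]
      have hcnt0 : pvCnt matrix r 0 = 0 := pvRC_empty_cols matrix 0 r 0 0 le_rfl
      split_ifs with h1 h2
      · rfl
      · have hc0 : c = 0 := by omega
        rw [hc0, hcnt0]
      · rfl
    | succ s ih =>
      intro hsn
      have hs : (s : Int) ≤ n := by push_cast at hsn ⊢; omega
      obtain ⟨ihS, ihV⟩ := ih hs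
      have hsplit : PySem.List.pyRange 1 (((s + 1 : Nat) : Int) + 1) 1 =
          PySem.List.pyRange 1 ((s : Int) + 1) 1 ++ [(s : Int) + 1] := by
        push_cast
        exact PySem.List.pyRange_one_succ_right (by omega)
      rw [hsplit, List.foldl_append, List.foldl_cons, List.foldl_nil]
      have e : (s : Int) + 1 - 1 = (s : Int) := by omega
      have hv : pvGrid2Get ((PySem.List.pyRange 1 ((s : Int) + 1) 1).foldl (fun g j =>
            pvGrid2Set g t j
              (pvGrid2Get g (t - 1) j + pvGrid2Get g t (j - 1) - pvGrid2Get g (t - 1) (j - 1) +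
                (if PySem.List.pyGetD (PySem.List.pyGetD matrix (t - 1) []) (j - 1) "" = "A" then 1 else 0))) g)
            (t - 1) ((s : Int) + 1) +
          pvGrid2Get ((PySem.List.pyRange 1 ((s : Int) + 1) 1).foldl (fun g j =>
            pvGrid2Set g t j
              (pvGrid2Get g (t - 1) j + pvGrid2Get g t (j - 1) - pvGrid2Get g (t - 1) (j - 1) +
                (if PySem.List.pyGetD (PySem.List.pyGetD matrix (t - 1) []) (j - 1) "" = "A" then 1 else 0))) g)
            t ((s : Int) + 1 - 1) -
          pvGrid2Get ((PySem.List.pyRange 1 ((s : Int) + 1) 1).foldl (fun g j =>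
            pvGrid2Set g t j
              (pvGrid2Get g (t - 1) j + pvGrid2Get g t (j - 1) - pvGrid2Get g (t - 1) (j - 1) +
                (if PySem.List.pyGetD (PySem.List.pyGetD matrix (t - 1) []) (j - 1) "" = "A" then 1 else 0))) g)
            (t - 1) ((s : Int) + 1 - 1) +
          (if PySem.List.pyGetD (PySem.List.pyGetD matrix (t - 1) []) ((s : Int) + 1 - 1) "" = "A" then 1 else 0) =
          pvCnt matrix t ((s : Int) + 1) := by
        rw [e]
        rw [ihV (t - 1) ((s : Int) + 1) (by omega) (by omega) (by omega) (by omega)]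
        rw [ihV t (s : Int) (by omega) (by omega) (by omega) (by omega)]
        rw [ihV (t - 1) (s : Int) (by omega) (by omega) (by omega) (by omega)]
        have hrec := pvCntRecur matrix t ((s : Int) + 1) ht (by omega)
        rw [e] at hrec
        have hcell : (if PySem.List.pyGetD (PySem.List.pyGetD matrix (t - 1) []) (s : Int) "" = "A" then (1 : Int) else 0) = pvCell matrix (t - 1) (s : Int) := rfl
        rw [hcell]
        split_ifs with h1 h2 h3 h4 h5 <;> omega
      rw [hv]
      constructor
      · exact pvShape_set _ m n t ((s : Int) + 1) ihS (by omega) htm (by omega) _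
      · intro r c hr hrm hc hcn
        by_cases hrc : r = t ∧ c = (s : Int) + 1
        · obtain ⟨h1, h2⟩ := hrc
          rw [h1, h2]
          rw [pvGet_set_self _ m n t ((s : Int) + 1) ihS (by omega) htm (by omega) (by omega) _]
          split_ifs with h1 h2 <;> first | rfl | omega
        · rw [pvGet_set_ne _ m n t ((s : Int) + 1) r c ihS (by omega) htm (by omega) (by omega) hr hrm hc hcn hrc _]
          rw [ihV r c hr hrm hc hcn]
          split_ifs <;> first | rfl | omega
  have e2 : ((n.toNat : Int)) = n := by omega
  have hkey := key n.toNat (by omega)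
  rw [e2] at hkey
  unfold pvRowStep
  refine ⟨hkey.1, fun r c hr hrm hc hcn => ?_⟩
  rw [hkey.2 r c hr hrm hc hcn]
  split_ifs <;> first | rfl | omega

theorem pvBuild_spec (matrix : List (List String)) (m n : Int) (hm : 0 ≤ m) (hn : 0 ≤ n) :
    ∀ r c, 0 ≤ r → r ≤ m → 0 ≤ c → c ≤ n →
      pvGrid2Get (pvBuild matrix m n) r c = pvCnt matrix r c := by
  have key : ∀ t : Nat, (t : Int) ≤ m →
      pvShape ((PySem.List.pyRange 1 ((t : Int) + 1) 1).foldl (pvRowStep matrix n) (pvInit m n)) m n ∧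
      ∀ r c, 0 ≤ r → r ≤ m → 0 ≤ c → c ≤ n →
        pvGrid2Get ((PySem.List.pyRange 1 ((t : Int) + 1) 1).foldl (pvRowStep matrix n) (pvInit m n)) r c =
          if r ≤ (t : Int) then pvCnt matrix r c else 0 := by
    intro t
    induction t with
    | zero =>
      intro _
      rw [PySem.List.pyRange_one_eq_nil (by norm_num)]
      refine ⟨pvShape_init m n hm hn, fun r c hr hrm hc hcn => ?_⟩
      rw [List.foldl_nil, pvGridGet_init m n r c]
      split_ifs with h1
      · have hr0 : r = 0 := by omega
        rw [hr0]
        unfold pvCnt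
        rw [pvRC_empty_rows matrix 0 0 0 c le_rfl]
      · rfl
    | succ t ih =>
      intro htm
      have ht : (t : Int) ≤ m := by push_cast at htm ⊢; omega
      obtain ⟨ihS, ihV⟩ := ih ht
      have hsplit : PySem.List.pyRange 1 (((t + 1 : Nat) : Int) + 1) 1 =
          PySem.List.pyRange 1 ((t : Int) + 1) 1 ++ [(t : Int) + 1] := by
        push_cast
        exact PySem.List.pyRange_one_succ_right (by omega)
      rw [hsplit, List.foldl_append, List.foldl_cons, List.foldl_nil]
      have hinv := pvRowStep_inv matrix m n ((t : Int) + 1) (by omega) (by push_cast at htm; omega) hn _ ihS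
        (fun r c hr hrm hc hcn => by
          rw [ihV r c hr hrm hc hcn]
          split_ifs <;> first | rfl | omega)
      refine ⟨hinv.1, fun r c hr hrm hc hcn => ?_⟩
      rw [hinv.2 r c hr hrm hc hcn]
      split_ifs <;> first | rfl | omega
  intro r c hr hrm hc hcn
  have e2 : ((m.toNat : Int)) = m := by omega
  have hkey := key m.toNat (by omega)
  rw [e2] at hkey
  unfold pvBuild
  rw [hkey.2 r c hr hrm hc hcn, if_pos hrm]

-- A as a max over a value list
def pvLA (matrix : List (List String)) (k : Int) : List Int :=
  let m : Int := matrix.length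
  let n : Int := (PySem.List.pyGetD matrix 0 []).length
  let prefix_sums := pvBuild matrix m n
  (PySem.List.pyRange 1 (m + 1) 1).flatMap (fun i =>
    (PySem.List.pyRange 1 (n + 1) 1).flatMap (fun j =>
      (PySem.List.pyRange i (m + 1) 1).flatMap (fun p =>
        ((PySem.List.pyRange j (n + 1) 1).filter (fun q =>
          decide (|(pvGrid2Get prefix_sums p q - pvGrid2Get prefix_sums p (j - 1) -
              pvGrid2Get prefix_sums (i - 1) q + pvGrid2Get prefix_sums (i - 1) (j - 1)) -
            ((p - i + 1) * (q - j + 1) -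
              (pvGrid2Get prefix_sums p q - pvGrid2Get prefix_sums p (j - 1) -
                pvGrid2Get prefix_sums (i - 1) q + pvGrid2Get prefix_sums (i - 1) (j - 1)))| ≤ k))).map
          (fun q => (p - i + 1) * (q - j + 1)))))

theorem pvA_eq (matrix : List (List String)) (k : Int) :
    find_largest_subgrid matrix k = List.foldl max 0 (pvLA matrix k) := by
  unfold find_largest_subgrid pvLA
  refine Eq.trans ?_ (pvFoldlMaxFlat _ _ _)
  apply PySem.List.foldl_congr_mem
  intro acc i _
  refine Eq.trans ?_ (pvFoldlMaxFlat _ _ _)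
  apply PySem.List.foldl_congr_mem
  intro acc2 j _
  refine Eq.trans ?_ (pvFoldlMaxFlat _ _ _)
  apply PySem.List.foldl_congr_mem
  intro acc3 p _
  exact pvFoldlIfMax _ _ _ _

theorem pvMemLA (matrix : List (List String)) (k x : Int) :
    x ∈ pvLA matrix k ↔ pvGood matrix k x := by
  have hm : (0 : Int) ≤ (matrix.length : Int) := by positivity
  have hn : (0 : Int) ≤ ((PySem.List.pyGetD matrix 0 []).length : Int) := by positivity
  unfold pvLA pvGood
  simp only [List.mem_flatMap, List.mem_map, List.mem_filter, PySem.List.mem_pyRange_one,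
    decide_eq_true_eq]
  constructor
  · rintro ⟨i, ⟨hi1, hi2⟩, j, ⟨hj1, hj2⟩, p, ⟨hp1, hp2⟩, q, ⟨⟨hq1, hq2⟩, hcond⟩, hx⟩
    refine ⟨i - 1, p, j - 1, q, by omega, by omega, by omega, by omega, by omega, by omega, ?_, by rw [← hx]; ring⟩
    rw [pvBuild_spec matrix _ _ hm hn p q (by omega) (by omega) (by omega) (by omega),
        pvBuild_spec matrix _ _ hm hn p (j - 1) (by omega) (by omega) (by omega) (by omega),
        pvBuild_spec matrix _ _ hm hn (i - 1) q (by omega) (by omega) (by omega) (by omega),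
        pvBuild_spec matrix _ _ hm hn (i - 1) (j - 1) (by omega) (by omega) (by omega) (by omega)] at hcond
    rw [pvInclExcl matrix (i - 1) p (j - 1) q (by omega) (by omega) (by omega) (by omega)] at hcond
    have he : pvRC matrix (i - 1) p (j - 1) q -
        ((p - i + 1) * (q - j + 1) - pvRC matrix (i - 1) p (j - 1) q) =
        2 * pvRC matrix (i - 1) p (j - 1) q - (p - (i - 1)) * (q - (j - 1)) := by ring
    rw [he] at hcond
    exact hcond
  · rintro ⟨a, b, c, d, ha, hab, hbm, hc, hcd, hdn, hcond, hx⟩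
    refine ⟨a + 1, ⟨by omega, by omega⟩, c + 1, ⟨by omega, by omega⟩, b, ⟨by omega, by omega⟩,
      d, ⟨⟨by omega, by omega⟩, ?_⟩, by rw [hx]; ring⟩
    rw [pvBuild_spec matrix _ _ hm hn b d (by omega) (by omega) (by omega) (by omega),
        pvBuild_spec matrix _ _ hm hn b (c + 1 - 1) (by omega) (by omega) (by omega) (by omega),
        pvBuild_spec matrix _ _ hm hn (a + 1 - 1) d (by omega) (by omega) (by omega) (by omega),
        pvBuild_spec matrix _ _ hm hn (a + 1 - 1) (c + 1 - 1) (by omega) (by omega) (by omega) (by omega)]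
    have e1 : a + 1 - 1 = a := by omega
    have e2 : c + 1 - 1 = c := by omega
    rw [e1, e2]
    rw [pvInclExcl matrix a b c d ha (by omega) hc (by omega)]
    have he : pvRC matrix a b c d - ((b - (a + 1) + 1) * (d - (c + 1) + 1) - pvRC matrix a b c d) =
        2 * pvRC matrix a b c d - (b - a) * (d - c) := by ring
    rw [he]
    exact hcond

-- B as a max over a value list
def pvLB (matrix : List (List String)) (k : Int) : List Int :=
  let m : Int := matrix.length
  let n : Int := (PySem.List.pyGetD matrix 0 []).length
  (PySem.List.pyRange 0 m 1).flatMap (fun i =>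
    (PySem.List.pyRange i m 1).flatMap (fun p =>
      (PySem.List.pyRange 0 n 1).flatMap (fun j =>
        ((PySem.List.pyRange j n 1).filter (fun q =>
          decide (|2 * pvRC matrix i (p + 1) j (q + 1) - (p - i + 1) * (q - j + 1)| ≤ k))).map
          (fun q => (p - i + 1) * (q - j + 1)))))

theorem pvBq (matrix : List (List String)) (n k h i p j : Int) (col : List Int)
    (hcol : col = (PySem.List.pyRange 0 n 1).map (fun c => pvRC matrix i (p + 1) c (c + 1)))
    (hj : 0 ≤ j) :
    ∀ (fuel : Nat) (q0 a0 best0 : Int), j ≤ q0 → (n - q0).toNat ≤ fuel →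
      a0 = pvRC matrix i (p + 1) j q0 →
      ((PySem.List.pyRange q0 n 1).foldl (fun (ab : Int × Int) q =>
          (ab.1 + PySem.List.pyGetD col q 0,
           if |2 * (ab.1 + PySem.List.pyGetD col q 0) - h * (q - j + 1)| ≤ k then
             max ab.2 (h * (q - j + 1)) else ab.2)) (a0, best0)).2 =
        List.foldl max best0
          (((PySem.List.pyRange q0 n 1).filter (fun q =>
              decide (|2 * pvRC matrix i (p + 1) j (q + 1) - h * (q - j + 1)| ≤ k))).map
            (fun q => h * (q - j + 1))) := by
  intro fuel
  induction fuel with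
  | zero =>
    intro q0 a0 best0 hq hf ha
    rw [PySem.List.pyRange_one_eq_nil (by omega)]
    rfl
  | succ f ih =>
    intro q0 a0 best0 hq hf ha
    by_cases hqn : q0 < n
    · rw [PySem.List.pyRange_one_cons hqn, List.foldl_cons, List.filter_cons]
      dsimp only
      have hcv : PySem.List.pyGetD col q0 0 = pvRC matrix i (p + 1) q0 (q0 + 1) := by
        rw [hcol]
        exact PySem.List.pyGetD_map_pyRange_of_nonneg _ n q0 0 (by omega) hqn
      have ha1 : a0 + PySem.List.pyGetD col q0 0 = pvRC matrix i (p + 1) j (q0 + 1) := by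
        rw [hcv, ha]
        exact (pvRC_split_cols matrix i (p + 1) j q0 (q0 + 1) hq (by omega)).symm
      rw [ha1]
      by_cases hcnd : |2 * pvRC matrix i (p + 1) j (q0 + 1) - h * (q0 - j + 1)| ≤ k
      · rw [if_pos hcnd, if_pos (by simpa using hcnd), List.map_cons, List.foldl_cons]
        exact ih (q0 + 1) _ _ (by omega) (by omega) rfl
      · rw [if_neg hcnd, if_neg (by simpa using hcnd)]
        exact ih (q0 + 1) _ _ (by omega) (by omega) rfl
    · rw [PySem.List.pyRange_one_eq_nil (by omega)]
      rfl

theorem pvColZero (matrix : List (List String)) (n i : Int) (hn : 0 ≤ n) :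
    PySem.List.pyRepeat [(0 : Int)] n =
      (PySem.List.pyRange 0 n 1).map (fun c => pvRC matrix i i c (c + 1)) := by
  rw [PySem.List.pyRepeat_singleton]
  have h1 : (PySem.List.pyRange 0 n 1).map (fun c => pvRC matrix i i c (c + 1)) =
      (PySem.List.pyRange 0 n 1).map (fun _ => (0 : Int)) :=
    List.map_congr_left (fun c _ => pvRC_empty_rows matrix i i c (c + 1) le_rfl)
  rw [h1, List.map_const']
  rw [PySem.List.length_pyRange_one]
  congr 1
  omega

theorem pvColStep (matrix : List (List String)) (n i p0 : Int) (hi : i ≤ p0) :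
    ((PySem.List.pyRange 0 n 1).map (fun c =>
        PySem.List.pyGetD ((PySem.List.pyRange 0 n 1).map (fun c => pvRC matrix i p0 c (c + 1))) c 0 +
          (if PySem.List.pyGetD (PySem.List.pyGetD matrix p0 []) c "" = "A" then 1 else 0))) =
      (PySem.List.pyRange 0 n 1).map (fun c => pvRC matrix i (p0 + 1) c (c + 1)) := by
  apply List.map_congr_left
  intro c hc
  rw [PySem.List.mem_pyRange_one] at hc
  rw [PySem.List.pyGetD_map_pyRange_of_nonneg _ n c 0 hc.1 hc.2]
  have hcell : (if PySem.List.pyGetD (PySem.List.pyGetD matrix p0 []) c "" = "A" then (1 : Int) else 0) =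
      pvCell matrix p0 c := rfl
  rw [hcell]
  rw [pvRC_split_rows matrix i p0 (p0 + 1) c (c + 1) hi (by omega)]
  rw [pvRC_single matrix p0 c]

theorem pvBp (matrix : List (List String)) (m n k i : Int) (hi : 0 ≤ i) (hn : 0 ≤ n) :
    ∀ (fuel : Nat) (p0 best0 : Int), i ≤ p0 → (m - p0).toNat ≤ fuel →
      ((PySem.List.pyRange p0 m 1).foldl (fun (st : List Int × Int) p =>
          ((PySem.List.pyRange 0 n 1).map (fun c =>
            PySem.List.pyGetD st.1 c 0 +
              (if PySem.List.pyGetD (PySem.List.pyGetD matrix p []) c "" = "A" then 1 else 0)),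
           (PySem.List.pyRange 0 n 1).foldl (fun best j =>
             ((PySem.List.pyRange j n 1).foldl (fun (ab : Int × Int) q =>
               (ab.1 + PySem.List.pyGetD ((PySem.List.pyRange 0 n 1).map (fun c =>
                  PySem.List.pyGetD st.1 c 0 +
                    (if PySem.List.pyGetD (PySem.List.pyGetD matrix p []) c "" = "A" then 1 else 0))) q 0,
                if |2 * (ab.1 + PySem.List.pyGetD ((PySem.List.pyRange 0 n 1).map (fun c =>
                    PySem.List.pyGetD st.1 c 0 +
                      (if PySem.List.pyGetD (PySem.List.pyGetD matrix p []) c "" = "A" then 1 else 0))) q 0) -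
                   (p - i + 1) * (q - j + 1)| ≤ k then
                  max ab.2 ((p - i + 1) * (q - j + 1)) else ab.2)) (0, best)).2) st.2))
          ((PySem.List.pyRange 0 n 1).map (fun c => pvRC matrix i p0 c (c + 1)), best0)).2 =
        List.foldl max best0 ((PySem.List.pyRange p0 m 1).flatMap (fun p =>
          (PySem.List.pyRange 0 n 1).flatMap (fun j =>
            ((PySem.List.pyRange j n 1).filter (fun q =>
              decide (|2 * pvRC matrix i (p + 1) j (q + 1) - (p - i + 1) * (q - j + 1)| ≤ k))).map
              (fun q => (p - i + 1) * (q - j + 1))))) := by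
  intro fuel
  induction fuel with
  | zero =>
    intro p0 best0 hp hf
    rw [PySem.List.pyRange_one_eq_nil (a := p0) (b := m) (by omega)]
    rfl
  | succ f ih =>
    intro p0 best0 hp hf
    by_cases hpm : p0 < m
    · rw [PySem.List.pyRange_one_cons (a := p0) (b := m) hpm, List.foldl_cons, List.flatMap_cons, List.foldl_append]
      dsimp only
      rw [pvColStep matrix n i p0 hp]
      have hjloop : (PySem.List.pyRange 0 n 1).foldl (fun best j =>
          ((PySem.List.pyRange j n 1).foldl (fun (ab : Int × Int) q =>
            (ab.1 + PySem.List.pyGetD ((PySem.List.pyRange 0 n 1).map (fun c =>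
                pvRC matrix i (p0 + 1) c (c + 1))) q 0,
             if |2 * (ab.1 + PySem.List.pyGetD ((PySem.List.pyRange 0 n 1).map (fun c =>
                 pvRC matrix i (p0 + 1) c (c + 1))) q 0) - (p0 - i + 1) * (q - j + 1)| ≤ k then
               max ab.2 ((p0 - i + 1) * (q - j + 1)) else ab.2)) (0, best)).2) best0 =
          List.foldl max best0 ((PySem.List.pyRange 0 n 1).flatMap (fun j =>
            ((PySem.List.pyRange j n 1).filter (fun q =>
              decide (|2 * pvRC matrix i (p0 + 1) j (q + 1) - (p0 - i + 1) * (q - j + 1)| ≤ k))).map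
              (fun q => (p0 - i + 1) * (q - j + 1)))) := by
        refine Eq.trans ?_ (pvFoldlMaxFlat _ _ _)
        apply PySem.List.foldl_congr_mem
        intro acc j hjmem
        rw [PySem.List.mem_pyRange_one] at hjmem
        exact pvBq matrix n k (p0 - i + 1) i p0 j _ rfl hjmem.1 (n - j).toNat j 0 acc le_rfl
          le_rfl (pvRC_empty_cols matrix i (p0 + 1) j j le_rfl).symm
      rw [hjloop]
      exact ih (p0 + 1) _ (by omega) (by omega)
    · rw [PySem.List.pyRange_one_eq_nil (a := p0) (b := m) (by omega)]
      rfl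

theorem pvB_eq (matrix : List (List String)) (k : Int) :
    find_largest_subgrid_alt matrix k = List.foldl max 0 (pvLB matrix k) := by
  have hn : (0 : Int) ≤ ((PySem.List.pyGetD matrix 0 []).length : Int) := by positivity
  unfold find_largest_subgrid_alt pvLB
  refine Eq.trans ?_ (pvFoldlMaxFlat _ _ _)
  apply PySem.List.foldl_congr_mem
  intro acc i hi
  rw [PySem.List.mem_pyRange_one] at hi
  rw [pvColZero matrix _ i hn]
  exact pvBp matrix _ _ k i hi.1 hn (((matrix.length : Int)) - i).toNat i acc le_rfl le_rfl

theorem pvMemLB (matrix : List (List String)) (k x : Int) :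
    x ∈ pvLB matrix k ↔ pvGood matrix k x := by
  unfold pvLB pvGood
  simp only [List.mem_flatMap, List.mem_map, List.mem_filter, PySem.List.mem_pyRange_one,
    decide_eq_true_eq]
  constructor
  · rintro ⟨i, ⟨hi1, hi2⟩, p, ⟨hp1, hp2⟩, j, ⟨hj1, hj2⟩, q, ⟨⟨hq1, hq2⟩, hcond⟩, hx⟩
    refine ⟨i, p + 1, j, q + 1, hi1, by omega, by omega, hj1, by omega, by omega, ?_, by rw [← hx]; ring⟩
    have he : (p + 1 - i) * (q + 1 - j) = (p - i + 1) * (q - j + 1) := by ring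
    rw [he]
    exact hcond
  · rintro ⟨a, b, c, d, ha, hab, hbm, hc, hcd, hdn, hcond, hx⟩
    refine ⟨a, ⟨ha, by omega⟩, b - 1, ⟨by omega, by omega⟩, c, ⟨hc, by omega⟩,
      d - 1, ⟨⟨by omega, by omega⟩, ?_⟩, by rw [hx]; ring⟩
    have e1 : b - 1 + 1 = b := by omega
    have e2 : d - 1 + 1 = d := by omega
    rw [e1, e2]
    have he : (b - 1 - a + 1) * (d - 1 - c + 1) = (b - a) * (d - c) := by ring
    rw [he]
    exact hcond

-- ===== VERDICT (by name: the statement is the Claim_ definition above) =====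
theorem find_largest_subgrid_spec : Claim_equal_find_largest_subgrid := by
  intro matrix k _ _
  unfold Spec_find_largest_subgrid
  rw [pvA_eq, pvB_eq]
  exact pvFoldlMaxCongr _ _ _ (fun x => (pvMemLA matrix k x).trans (pvMemLB matrix k x).symm)
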